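-- pv_equiv track=rewrite | github.com/qzane/q-learning | q_learning.py | Hanoi_able
-- ===== SOURCE A (Python) =====
-- def Hanoi_able(s1,s2):#步骤是否可行
--         change = sum((s1[i]!=s2[i] for i in range(3)))
--         if change != 1:
--             return False#只能移动一块砖
--         for change in range(3):
--             if(s1[change]!=s2[change]):
--                 break
--         for upper in range(change+1,3):
--             if s1[upper]==s1[change]:
--                 return False#这块砖上不能有小的
--             if s2[upper]==s2[change]:
--                 return False#移动到的位置下面不能有小的
--         return True
-- ===== SOURCE B (Python) =====
-- def Hanoi_able(s1, s2):
--     # Peg-stack view: group disk indices by peg; a legal move pops the top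
--     # disk d off exactly one peg's stack and pushes the same d on top of
--     # exactly one other peg's stack, all other stacks unchanged.
--     def stacks(s):
--         st = {}
--         for i in range(3):
--             st.setdefault(s[i], []).append(i)
--         return st
--     t1 = stacks(s1)
--     t2 = stacks(s2)
--     pegs = list(t1) + [p for p in t2 if p not in t1]
--     sources = []
--     dests = []
--     for p in pegs:
--         a = t1.get(p, [])
--         b = t2.get(p, [])
--         if a == b:
--             continue
--         if a[:-1] == b:
--             sources.append(a[-1])
--         elif b[:-1] == a:
--             dests.append(b[-1])
--         else:
--             return False
--     return len(sources) == 1 and len(dests) == 1 and sources[0] == dests[0]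
-- ===== Notes on version B (the rewrite author's own statement) =====
-- stated objective: alternative
-- what changed: A counts differing positions and scans indices above the changed one for colliding peg values; B switches to the peg-stack representation (peg -> ordered list of disk indices, built per state) and checks that exactly one peg popped its top disk and exactly one other peg pushed that same disk, all other stacks unchanged.
import Mathlib
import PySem

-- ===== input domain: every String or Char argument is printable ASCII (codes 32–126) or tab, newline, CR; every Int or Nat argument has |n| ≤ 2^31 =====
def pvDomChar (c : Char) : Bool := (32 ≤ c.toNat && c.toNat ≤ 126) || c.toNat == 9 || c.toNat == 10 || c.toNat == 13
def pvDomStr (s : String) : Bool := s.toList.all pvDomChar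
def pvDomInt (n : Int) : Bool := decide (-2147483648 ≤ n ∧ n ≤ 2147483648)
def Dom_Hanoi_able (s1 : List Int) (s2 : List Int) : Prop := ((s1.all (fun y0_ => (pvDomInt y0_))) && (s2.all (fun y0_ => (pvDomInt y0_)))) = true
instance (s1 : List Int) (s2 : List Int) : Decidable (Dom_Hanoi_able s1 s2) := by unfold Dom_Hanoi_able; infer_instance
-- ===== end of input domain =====

-- B replaces A's diff-count + break-loop + inline upper-collision scan by the peg-stack view:
-- group disk indices by peg for both states and demand exactly one peg popped its top disk d and
-- exactly one other peg pushed the same d (objective: alternative; equivalence of the return value).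
set_option maxRecDepth 20000

-- ===== PORT A =====
def aFindChange (s1 s2 : List Int) (last : Int) : List Int → Int
  | [] => last
  | i :: rest =>
    if PySem.List.pyGetD s1 i 0 ≠ PySem.List.pyGetD s2 i 0 then i
    else aFindChange s1 s2 i rest

def aUpperLoop (s1 s2 : List Int) (c : Int) : List Int → Bool
  | [] => true
  | u :: rest =>
    if PySem.List.pyGetD s1 u 0 = PySem.List.pyGetD s1 c 0 then false
    else if PySem.List.pyGetD s2 u 0 = PySem.List.pyGetD s2 c 0 then false
    else aUpperLoop s1 s2 c rest

def Hanoi_able (s1 : List Int) (s2 : List Int) : Bool :=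
  let change : Int :=
    ((PySem.List.pyRange 0 3 1).map
      (fun i => if PySem.List.pyGetD s1 i 0 ≠ PySem.List.pyGetD s2 i 0 then (1 : Int) else 0)).sum
  if change ≠ 1 then false
  else
    let c := aFindChange s1 s2 0 (PySem.List.pyRange 0 3 1)
    aUpperLoop s1 s2 c (PySem.List.pyRange (c + 1) 3 1)


-- ===== PORT B =====
def bStacks (s : List Int) : PySem.Dict Int (List Int) :=
  (PySem.List.pyRange 0 3 1).foldl
    (fun st i => st.modify (PySem.List.pyGetD s i 0) [] (· ++ [i])) PySem.Dict.empty

def bLoop (t1 t2 : PySem.Dict Int (List Int)) :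
    List Int → List Int → List Int → Option (List Int × List Int)
  | [], ss, ds => some (ss, ds)
  | p :: rest, ss, ds =>
    let a := (t1.getD p [])
    let b := (t2.getD p [])
    if a = b then bLoop t1 t2 rest ss ds
    else if a.dropLast = b then bLoop t1 t2 rest (ss ++ [a.getLastD 0]) ds
    else if b.dropLast = a then bLoop t1 t2 rest ss (ds ++ [b.getLastD 0])
    else none

def Hanoi_able_alt (s1 : List Int) (s2 : List Int) : Bool :=
  let t1 := bStacks s1
  let t2 := bStacks s2
  let pegs := t1.keys ++ t2.keys.filter (fun p => ¬ t1.contains p)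
  match bLoop t1 t2 pegs [] [] with
  | none => false
  | some (ss, ds) =>
    ss.length == 1 && ds.length == 1 && ss.headD 0 == ds.headD 0


-- ===== PRECONDITION & SPEC =====
-- Pre_ excludes exactly the inputs on which A raises IndexError: a list shorter than 3.
def Pre_Hanoi_able (s1 : List Int) (s2 : List Int) : Prop := 3 ≤ s1.length ∧ 3 ≤ s2.length
instance (s1 : List Int) (s2 : List Int) : Decidable (Pre_Hanoi_able s1 s2) := by
  unfold Pre_Hanoi_able; infer_instance

def pvWitness_Hanoi_able : List Int × List Int := ([0, 0, 0], [0, 0, 1])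

def Spec_Hanoi_able (s1 : List Int) (s2 : List Int) (out : Bool) : Prop := out = Hanoi_able_alt s1 s2
instance (s1 : List Int) (s2 : List Int) (out : Bool) : Decidable (Spec_Hanoi_able s1 s2 out) := by
  unfold Spec_Hanoi_able; infer_instance

-- ===== CLAIM (what is proved, stated in full; the proofs are below) =====
def Claim_equal_Hanoi_able : Prop := ∀ (s1 : List Int) (s2 : List Int), Dom_Hanoi_able s1 s2 → Pre_Hanoi_able s1 s2 → Spec_Hanoi_able s1 s2 (Hanoi_able s1 s2)

-- ===== LEMMAS AND PROOFS =====
theorem pvG0 (u : Int) (rest : List Int) (d : Int) : PySem.List.pyGetD (u::rest) (0:Int) d = u := by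
  simp [pysem]
theorem pvG1 (u v : Int) (rest : List Int) (d : Int) : PySem.List.pyGetD (u::v::rest) (1:Int) d = v := by
  simp [pysem]
theorem pvG2 (u v w : Int) (rest : List Int) (d : Int) : PySem.List.pyGetD (u::v::w::rest) (2:Int) d = w := by
  simp [pysem]

theorem pvStacksUnfold (u v w : Int) (r : List Int) :
    bStacks (u::v::w::r)
      = ((PySem.Dict.empty.modify u [] (· ++ [0])).modify v [] (· ++ [1])).modify w [] (· ++ [2]) := by
  have hr : PySem.List.pyRange 0 3 1 = [0,1,2] := rfl
  unfold bStacks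
  rw [hr]
  simp only [List.foldl, pvG0, pvG1, pvG2]

set_option maxHeartbeats 1600000 in
theorem pvStacksGetD (u v w : Int) (r : List Int) (p : Int) :
    (bStacks (u::v::w::r)).getD p [] =
      (if u = p then [(0:Int)] else []) ++ (if v = p then [1] else []) ++ (if w = p then [2] else []) := by
  rw [pvStacksUnfold]
  by_cases h1 : u = p <;> by_cases h2 : v = p <;> by_cases h3 : w = p <;>
    by_cases h4 : u = v <;> by_cases h5 : u = w <;> by_cases h6 : v = w <;>
    simp_all [PySem.Dict.modify, PySem.Dict.insert, PySem.Dict.empty, PySem.Dict.getD,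
      PySem.Dict.get?, PySem.Dict.contains, List.find?, beq_iff_eq, beq_eq_decide]

theorem pvStacksKeys (u v w : Int) (r : List Int) :
    (bStacks (u::v::w::r)).keys = PySem.Set.ofList [u,v,w] := by
  unfold bStacks
  rw [PySem.Dict.keys_foldl_modify_key]
  have hr : PySem.List.pyRange 0 3 1 = [0,1,2] := rfl
  rw [hr]
  simp only [List.map, pvG0, pvG1, pvG2, PySem.Dict.keys_empty]
  rw [show ([u,v,w] : List Int) = ([u] ++ [v]) ++ [w] from rfl,
    PySem.Set.ofList_append_singleton, PySem.Set.ofList_append_singleton]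
  simp [PySem.Set.update_cons, PySem.Set.update_nil, PySem.Set.ofList_cons,
    PySem.Set.ofList_nil, PySem.Set.discard, PySem.Set.add]

theorem pvKeysIf (u v w : Int) :
    PySem.Set.ofList [u,v,w]
      = [u] ++ (if v = u then [] else [v]) ++ (if w = u ∨ w = v then [] else [w]) := by
  by_cases h1 : v = u <;> by_cases h2 : w = u <;> by_cases h3 : w = v <;>
    simp_all [PySem.Set.ofList_cons, PySem.Set.ofList_nil, PySem.Set.discard]

theorem pvStacksContains (u v w : Int) (r : List Int) (p : Int) :
    (bStacks (u::v::w::r)).contains p = (p == u || p == v || p == w) := by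
  rw [PySem.Dict.contains_eq_decide_mem_keys, pvStacksKeys]
  simp [PySem.Set.mem_ofList]
  by_cases h1 : p = u <;> by_cases h2 : p = v <;> by_cases h3 : p = w <;> simp_all
theorem pvR0 : PySem.List.pyRange 0 3 1 = [0,1,2] := rfl
theorem pvR1 : PySem.List.pyRange 1 3 1 = [1,2] := rfl
theorem pvR2 : PySem.List.pyRange 2 3 1 = [2] := rfl
theorem pvR3 : PySem.List.pyRange 3 3 1 = [] := rfl

set_option maxHeartbeats 4000000 in
theorem pvCase0 (a b c x y z : Int) (r t : List Int) (h1 : ¬ a = x) (h2 : b = y) (h3 : c = z) :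
    Hanoi_able (a :: b :: c :: r) (x :: y :: z :: t)
      = Hanoi_able_alt (a :: b :: c :: r) (x :: y :: z :: t) := by
  subst h2 h3
  have h1' : ¬ x = a := fun q => h1 q.symm
  by_cases hba : b = a <;> by_cases hca : c = a <;> by_cases hcb : c = b <;>
  by_cases hxb : x = b <;> by_cases hxc : x = c <;>
  (try have hba' : ¬ a = b := fun q => hba q.symm) <;>
  (try have hca' : ¬ a = c := fun q => hca q.symm) <;>
  (try have hcb' : ¬ b = c := fun q => hcb q.symm) <;>
  (try have hxb' : ¬ b = x := fun q => hxb q.symm) <;>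
  (try have hxc' : ¬ c = x := fun q => hxc q.symm) <;>
  simp_all [Hanoi_able, Hanoi_able_alt, aFindChange, aUpperLoop, bLoop,
    pvStacksGetD, pvStacksKeys, pvKeysIf, pvStacksContains,
    pvG0, pvG1, pvG2, pvR0, pvR1, pvR2, pvR3]

def pvOkP (t1 t2 : PySem.Dict Int (List Int)) (p : Int) : Prop :=
  t1.getD p [] = t2.getD p [] ∨ (t1.getD p []).dropLast = t2.getD p []
    ∨ (t2.getD p []).dropLast = t1.getD p []

def pvSrcB (t1 t2 : PySem.Dict Int (List Int)) (p : Int) : Bool :=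
  !(decide (t1.getD p [] = t2.getD p [])) && decide ((t1.getD p []).dropLast = t2.getD p [])

theorem pvLoopSelf (t : PySem.Dict Int (List Int)) (pegs ss ds : List Int) :
    bLoop t t pegs ss ds = some (ss, ds) := by
  induction pegs generalizing ss ds with
  | nil => rfl
  | cons q rest ih => simp [bLoop, ih]

theorem pvLoopNone (t1 t2 : PySem.Dict Int (List Int)) (pegs ss ds : List Int) (p : Int)
    (hp : p ∈ pegs) (hok : ¬ pvOkP t1 t2 p) : bLoop t1 t2 pegs ss ds = none := by
  induction pegs generalizing ss ds with
  | nil => simp at hp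
  | cons q rest ih =>
    unfold pvOkP at hok
    push_neg at hok
    rcases List.mem_cons.mp hp with h | h
    · subst h
      simp [bLoop, hok.1, hok.2.1, hok.2.2]
    · simp only [bLoop]
      split_ifs <;> first | exact ih _ _ h | rfl

theorem pvLoopOk (t1 t2 : PySem.Dict Int (List Int)) (pegs ss ds : List Int)
    (v : List Int × List Int) (p : Int)
    (h : bLoop t1 t2 pegs ss ds = some v) (hp : p ∈ pegs) : pvOkP t1 t2 p := by
  induction pegs generalizing ss ds with
  | nil => simp at hp
  | cons q rest ih =>
    unfold bLoop at h
    rcases List.mem_cons.mp hp with hq | hq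
    · subst hq
      by_cases e1 : t1.getD p [] = t2.getD p []
      · exact Or.inl e1
      · by_cases e2 : (t1.getD p []).dropLast = t2.getD p []
        · exact Or.inr (Or.inl e2)
        · by_cases e3 : (t2.getD p []).dropLast = t1.getD p []
          · exact Or.inr (Or.inr e3)
          · simp [e1, e2, e3] at h
    · simp only [bLoop] at h
      split_ifs at h <;> exact ih _ _ h hq

theorem pvLoopLen (t1 t2 : PySem.Dict Int (List Int)) (pegs : List Int) :
    ∀ (ss ds ss' ds' : List Int), bLoop t1 t2 pegs ss ds = some (ss', ds') →
      ss'.length = ss.length + pegs.countP (pvSrcB t1 t2) := by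
  induction pegs with
  | nil => intro ss ds ss' ds' h; simp [bLoop] at h; simp [h.1.symm]
  | cons q rest ih =>
    intro ss ds ss' ds' h
    unfold bLoop at h
    simp only [List.countP_cons]
    by_cases e1 : t1.getD q [] = t2.getD q []
    · simp [e1, pvSrcB] at h ⊢
      exact ih _ _ _ _ h
    · by_cases e2 : (t1.getD q []).dropLast = t2.getD q []
      · simp [e1, e2, pvSrcB] at h ⊢
        have := ih _ _ _ _ h
        simp at this
        omega
      · by_cases e3 : (t2.getD q []).dropLast = t1.getD q []
        · simp [e1, e2, e3, pvSrcB] at h ⊢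
          exact ih _ _ _ _ h
        · simp [e1, e2, e3] at h

theorem pvMemDiff (t1 t2 : PySem.Dict Int (List Int)) (p : Int) (i : Int)
    (hA : i ∈ t1.getD p []) (hB : i ∉ t2.getD p []) (hok : pvOkP t1 t2 p) :
    pvSrcB t1 t2 p = true := by
  rcases hok with h | h | h
  · exact absurd (h ▸ hA) hB
  · simp [pvSrcB, h]
    intro heq
    exact hB (heq ▸ hA)
  · exact absurd (List.Sublist.subset (List.dropLast_sublist _) (h ▸ hA)) hB

theorem pvNotOk (t1 t2 : PySem.Dict Int (List Int)) (p : Int) (i j : Int) (hij : i ≠ j)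
    (hiA : i ∈ t1.getD p []) (hjA : j ∈ t1.getD p [])
    (hiB : i ∉ t2.getD p []) (hjB : j ∉ t2.getD p []) : ¬ pvOkP t1 t2 p := by
  intro hok
  rcases hok with h | h | h
  · exact hiB (h ▸ hiA)
  · have hne : t1.getD p [] ≠ [] := by intro hz; rw [hz] at hiA; simp at hiA
    have hsplit := List.dropLast_append_getLast hne
    have hi : i = (t1.getD p []).getLast hne := by
      rcases List.mem_append.mp (hsplit ▸ hiA) with hm | hm
      · exact absurd (h ▸ hm) hiB
      · simpa using hm
    have hj : j = (t1.getD p []).getLast hne := by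
      rcases List.mem_append.mp (hsplit ▸ hjA) with hm | hm
      · exact absurd (h ▸ hm) hjB
      · simpa using hm
    exact hij (hi.trans hj.symm)
  · exact hiB (List.Sublist.subset (List.dropLast_sublist _) (h ▸ hiA))

theorem pvTwoMem (l : List Int) (P : Int → Bool) (p q : Int) (hpq : p ≠ q)
    (hp : p ∈ l) (hq : q ∈ l) (hP : P p = true) (hQ : P q = true) : 2 ≤ l.countP P := by
  rw [List.countP_eq_length_filter]
  have hp' : p ∈ l.filter P := List.mem_filter.mpr ⟨hp, hP⟩
  have hq' : q ∈ l.filter P := List.mem_filter.mpr ⟨hq, hQ⟩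
  match hf : l.filter P with
  | [] => rw [hf] at hp'; simp at hp'
  | [x] =>
    rw [hf] at hp' hq'
    simp at hp' hq'
    exact absurd (hp'.trans hq'.symm) hpq
  | x :: y :: rest => simp

theorem pvMem0 (u v w : Int) (r : List Int) (p : Int) :
    ((0:Int) ∈ (bStacks (u::v::w::r)).getD p []) ↔ u = p := by
  rw [pvStacksGetD]
  by_cases h1 : u = p <;> by_cases h2 : v = p <;> by_cases h3 : w = p <;> simp_all

theorem pvMem1 (u v w : Int) (r : List Int) (p : Int) :
    ((1:Int) ∈ (bStacks (u::v::w::r)).getD p []) ↔ v = p := by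
  rw [pvStacksGetD]
  by_cases h1 : u = p <;> by_cases h2 : v = p <;> by_cases h3 : w = p <;> simp_all

theorem pvMem2 (u v w : Int) (r : List Int) (p : Int) :
    ((2:Int) ∈ (bStacks (u::v::w::r)).getD p []) ↔ w = p := by
  rw [pvStacksGetD]
  by_cases h1 : u = p <;> by_cases h2 : v = p <;> by_cases h3 : w = p <;> simp_all

theorem pvMemKeys (u v w : Int) (r : List Int) (p : Int) (h : p = u ∨ p = v ∨ p = w) :
    p ∈ (bStacks (u::v::w::r)).keys := by
  rw [pvStacksKeys]
  rw [PySem.Set.mem_ofList]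
  simpa using h

theorem pvAltEq (s1 s2 : List Int) :
    Hanoi_able_alt s1 s2 =
      (match bLoop (bStacks s1) (bStacks s2)
          ((bStacks s1).keys ++ (bStacks s2).keys.filter (fun p => ¬ (bStacks s1).contains p))
          [] [] with
      | none => false
      | some (ss, ds) => ss.length == 1 && ds.length == 1 && ss.headD 0 == ds.headD 0) := rfl

theorem pvAltF01 (a b c x y z : Int) (r t : List Int) (h1 : ¬ a = x) (h2 : ¬ b = y) :
    Hanoi_able_alt (a::b::c::r) (x::y::z::t) = false := by
  have hamem : a ∈ (bStacks (a::b::c::r)).keys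
      ++ (bStacks (x::y::z::t)).keys.filter (fun p => ¬ (bStacks (a::b::c::r)).contains p) :=
    List.mem_append_left _ (pvMemKeys a b c r a (Or.inl rfl))
  have h0A : (0:Int) ∈ (bStacks (a::b::c::r)).getD a [] := (pvMem0 a b c r a).mpr rfl
  have h0B : (0:Int) ∉ (bStacks (x::y::z::t)).getD a [] :=
    fun hm => h1 (((pvMem0 x y z t a).mp hm).symm)
  rw [pvAltEq]
  by_cases hba : b = a
  · have h1A : (1:Int) ∈ (bStacks (a::b::c::r)).getD a [] := (pvMem1 a b c r a).mpr hba
    have h1B : (1:Int) ∉ (bStacks (x::y::z::t)).getD a [] :=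
      fun hm => h2 (by rw [hba]; exact ((pvMem1 x y z t a).mp hm).symm)
    rw [pvLoopNone _ _ _ _ _ a hamem
      (pvNotOk _ _ a 0 1 (by decide) h0A h1A h0B h1B)]
  · have hbmem : b ∈ (bStacks (a::b::c::r)).keys
        ++ (bStacks (x::y::z::t)).keys.filter (fun p => ¬ (bStacks (a::b::c::r)).contains p) :=
      List.mem_append_left _ (pvMemKeys a b c r b (Or.inr (Or.inl rfl)))
    have h1A : (1:Int) ∈ (bStacks (a::b::c::r)).getD b [] := (pvMem1 a b c r b).mpr rfl
    have h1B : (1:Int) ∉ (bStacks (x::y::z::t)).getD b [] :=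
      fun hm => h2 (((pvMem1 x y z t b).mp hm).symm)
    cases hres : bLoop (bStacks (a::b::c::r)) (bStacks (x::y::z::t))
        ((bStacks (a::b::c::r)).keys
          ++ (bStacks (x::y::z::t)).keys.filter (fun p => ¬ (bStacks (a::b::c::r)).contains p))
        [] [] with
    | none => rfl
    | some v =>
      obtain ⟨ss, ds⟩ := v
      have hoka := pvLoopOk _ _ _ _ _ _ a hres hamem
      have hokb := pvLoopOk _ _ _ _ _ _ b hres hbmem
      have hsa := pvMemDiff _ _ a 0 h0A h0B hoka
      have hsb := pvMemDiff _ _ b 1 h1A h1B hokb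
      have hlen := pvLoopLen _ _ _ _ _ _ _ hres
      have h2le := pvTwoMem _ _ a b (fun q => hba q.symm) hamem hbmem hsa hsb
      have hne : ss.length ≠ 1 := by omega
      simp [hne]

theorem pvAltF02 (a b c x y z : Int) (r t : List Int) (h1 : ¬ a = x) (h3 : ¬ c = z) :
    Hanoi_able_alt (a::b::c::r) (x::y::z::t) = false := by
  have hamem : a ∈ (bStacks (a::b::c::r)).keys
      ++ (bStacks (x::y::z::t)).keys.filter (fun p => ¬ (bStacks (a::b::c::r)).contains p) :=
    List.mem_append_left _ (pvMemKeys a b c r a (Or.inl rfl))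
  have h0A : (0:Int) ∈ (bStacks (a::b::c::r)).getD a [] := (pvMem0 a b c r a).mpr rfl
  have h0B : (0:Int) ∉ (bStacks (x::y::z::t)).getD a [] :=
    fun hm => h1 (((pvMem0 x y z t a).mp hm).symm)
  rw [pvAltEq]
  by_cases hca : c = a
  · have h2A : (2:Int) ∈ (bStacks (a::b::c::r)).getD a [] := (pvMem2 a b c r a).mpr hca
    have h2B : (2:Int) ∉ (bStacks (x::y::z::t)).getD a [] :=
      fun hm => h3 (by rw [hca]; exact ((pvMem2 x y z t a).mp hm).symm)
    rw [pvLoopNone _ _ _ _ _ a hamem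
      (pvNotOk _ _ a 0 2 (by decide) h0A h2A h0B h2B)]
  · have hcmem : c ∈ (bStacks (a::b::c::r)).keys
        ++ (bStacks (x::y::z::t)).keys.filter (fun p => ¬ (bStacks (a::b::c::r)).contains p) :=
      List.mem_append_left _ (pvMemKeys a b c r c (Or.inr (Or.inr rfl)))
    have h2A : (2:Int) ∈ (bStacks (a::b::c::r)).getD c [] := (pvMem2 a b c r c).mpr rfl
    have h2B : (2:Int) ∉ (bStacks (x::y::z::t)).getD c [] :=
      fun hm => h3 (((pvMem2 x y z t c).mp hm).symm)
    cases hres : bLoop (bStacks (a::b::c::r)) (bStacks (x::y::z::t))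
        ((bStacks (a::b::c::r)).keys
          ++ (bStacks (x::y::z::t)).keys.filter (fun p => ¬ (bStacks (a::b::c::r)).contains p))
        [] [] with
    | none => rfl
    | some v =>
      obtain ⟨ss, ds⟩ := v
      have hoka := pvLoopOk _ _ _ _ _ _ a hres hamem
      have hokc := pvLoopOk _ _ _ _ _ _ c hres hcmem
      have hsa := pvMemDiff _ _ a 0 h0A h0B hoka
      have hsc := pvMemDiff _ _ c 2 h2A h2B hokc
      have hlen := pvLoopLen _ _ _ _ _ _ _ hres
      have h2le := pvTwoMem _ _ a c (fun q => hca q.symm) hamem hcmem hsa hsc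
      have hne : ss.length ≠ 1 := by omega
      simp [hne]

theorem pvAltF12 (a b c x y z : Int) (r t : List Int) (h2 : ¬ b = y) (h3 : ¬ c = z) :
    Hanoi_able_alt (a::b::c::r) (x::y::z::t) = false := by
  have hbmem : b ∈ (bStacks (a::b::c::r)).keys
      ++ (bStacks (x::y::z::t)).keys.filter (fun p => ¬ (bStacks (a::b::c::r)).contains p) :=
    List.mem_append_left _ (pvMemKeys a b c r b (Or.inr (Or.inl rfl)))
  have h1A : (1:Int) ∈ (bStacks (a::b::c::r)).getD b [] := (pvMem1 a b c r b).mpr rfl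
  have h1B : (1:Int) ∉ (bStacks (x::y::z::t)).getD b [] :=
    fun hm => h2 (((pvMem1 x y z t b).mp hm).symm)
  rw [pvAltEq]
  by_cases hcb : c = b
  · have h2A : (2:Int) ∈ (bStacks (a::b::c::r)).getD b [] := (pvMem2 a b c r b).mpr hcb
    have h2B : (2:Int) ∉ (bStacks (x::y::z::t)).getD b [] :=
      fun hm => h3 (by rw [hcb]; exact ((pvMem2 x y z t b).mp hm).symm)
    rw [pvLoopNone _ _ _ _ _ b hbmem
      (pvNotOk _ _ b 1 2 (by decide) h1A h2A h1B h2B)]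
  · have hcmem : c ∈ (bStacks (a::b::c::r)).keys
        ++ (bStacks (x::y::z::t)).keys.filter (fun p => ¬ (bStacks (a::b::c::r)).contains p) :=
      List.mem_append_left _ (pvMemKeys a b c r c (Or.inr (Or.inr rfl)))
    have h2A : (2:Int) ∈ (bStacks (a::b::c::r)).getD c [] := (pvMem2 a b c r c).mpr rfl
    have h2B : (2:Int) ∉ (bStacks (x::y::z::t)).getD c [] :=
      fun hm => h3 (((pvMem2 x y z t c).mp hm).symm)
    cases hres : bLoop (bStacks (a::b::c::r)) (bStacks (x::y::z::t))
        ((bStacks (a::b::c::r)).keys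
          ++ (bStacks (x::y::z::t)).keys.filter (fun p => ¬ (bStacks (a::b::c::r)).contains p))
        [] [] with
    | none => rfl
    | some v =>
      obtain ⟨ss, ds⟩ := v
      have hokb := pvLoopOk _ _ _ _ _ _ b hres hbmem
      have hokc := pvLoopOk _ _ _ _ _ _ c hres hcmem
      have hsb := pvMemDiff _ _ b 1 h1A h1B hokb
      have hsc := pvMemDiff _ _ c 2 h2A h2B hokc
      have hlen := pvLoopLen _ _ _ _ _ _ _ hres
      have h2le := pvTwoMem _ _ b c (fun q => hcb q.symm) hbmem hcmem hsb hsc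
      have hne : ss.length ≠ 1 := by omega
      simp [hne]

set_option maxHeartbeats 4000000 in
theorem pvCase1 (a b c x y z : Int) (r t : List Int) (h1 : a = x) (h2 : ¬ b = y) (h3 : c = z) :
    Hanoi_able (a :: b :: c :: r) (x :: y :: z :: t)
      = Hanoi_able_alt (a :: b :: c :: r) (x :: y :: z :: t) := by
  subst h1 h3
  have h2' : ¬ y = b := fun q => h2 q.symm
  by_cases hba : b = a <;> by_cases hca : c = a <;> by_cases hcb : c = b <;>
  by_cases hya : y = a <;> by_cases hyc : y = c <;>
  (try have hba' : ¬ a = b := fun q => hba q.symm) <;>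
  (try have hca' : ¬ a = c := fun q => hca q.symm) <;>
  (try have hcb' : ¬ b = c := fun q => hcb q.symm) <;>
  (try have hya' : ¬ a = y := fun q => hya q.symm) <;>
  (try have hyc' : ¬ c = y := fun q => hyc q.symm) <;>
  simp_all [Hanoi_able, Hanoi_able_alt, aFindChange, aUpperLoop, bLoop,
    pvStacksGetD, pvStacksKeys, pvKeysIf, pvStacksContains,
    pvG0, pvG1, pvG2, pvR0, pvR1, pvR2, pvR3]

set_option maxHeartbeats 4000000 in
theorem pvCase2 (a b c x y z : Int) (r t : List Int) (h1 : a = x) (h2 : b = y) (h3 : ¬ c = z) :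
    Hanoi_able (a :: b :: c :: r) (x :: y :: z :: t)
      = Hanoi_able_alt (a :: b :: c :: r) (x :: y :: z :: t) := by
  subst h1 h2
  have h3' : ¬ z = c := fun q => h3 q.symm
  by_cases hba : b = a <;> by_cases hca : c = a <;> by_cases hcb : c = b <;>
  by_cases hza : z = a <;> by_cases hzb : z = b <;>
  (try have hba' : ¬ a = b := fun q => hba q.symm) <;>
  (try have hca' : ¬ a = c := fun q => hca q.symm) <;>
  (try have hcb' : ¬ b = c := fun q => hcb q.symm) <;>
  (try have hza' : ¬ a = z := fun q => hza q.symm) <;>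
  (try have hzb' : ¬ b = z := fun q => hzb q.symm) <;>
  simp_all [Hanoi_able, Hanoi_able_alt, aFindChange, aUpperLoop, bLoop,
    pvStacksGetD, pvStacksKeys, pvKeysIf, pvStacksContains,
    pvG0, pvG1, pvG2, pvR0, pvR1, pvR2, pvR3]

theorem pvAFalse (a b c x y z : Int) (r t : List Int)
    (h : ¬ ((if a = x then 0 else 1) + ((if b = y then 0 else 1) + (if c = z then 0 else 1))
        = (1:Int))) :
    Hanoi_able (a :: b :: c :: r) (x :: y :: z :: t) = false := by
  simp only [Hanoi_able, pvR0, List.map, pvG0, pvG1, pvG2, List.sum_cons, List.sum_nil]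
  split_ifs <;> simp_all

theorem pvKey (a b c x y z : Int) (r t : List Int) :
    Hanoi_able (a :: b :: c :: r) (x :: y :: z :: t)
      = Hanoi_able_alt (a :: b :: c :: r) (x :: y :: z :: t) := by
  by_cases h1 : a = x <;> by_cases h2 : b = y <;> by_cases h3 : c = z
  · -- no change: both false
    subst h1 h2 h3
    have ht : bStacks (a::b::c::t) = bStacks (a::b::c::r) := by
      rw [pvStacksUnfold, pvStacksUnfold]
    rw [pvAltEq, ht, pvLoopSelf]
    rw [pvAFalse _ _ _ _ _ _ _ _ (by simp)]
    rfl
  · exact pvCase2 a b c x y z r t h1 h2 h3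
  · exact pvCase1 a b c x y z r t h1 h2 h3
  · rw [pvAltF12 a b c x y z r t h2 h3, pvAFalse _ _ _ _ _ _ _ _ (by simp [h1, h2, h3])]
  · exact pvCase0 a b c x y z r t h1 h2 h3
  · rw [pvAltF02 a b c x y z r t h1 h3, pvAFalse _ _ _ _ _ _ _ _ (by simp [h1, h2, h3])]
  · rw [pvAltF01 a b c x y z r t h1 h2, pvAFalse _ _ _ _ _ _ _ _ (by simp [h1, h2, h3])]
  · rw [pvAltF01 a b c x y z r t h1 h2, pvAFalse _ _ _ _ _ _ _ _ (by simp [h1, h2, h3])]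

-- ===== VERDICT (by name: the statement is the Claim_ definition above) =====
theorem Hanoi_able_spec : Claim_equal_Hanoi_able := by
  intro s1 s2 _ hpre
  obtain ⟨hl1, hl2⟩ := hpre
  match s1, s2 with
  | a :: b :: c :: r, x :: y :: z :: t =>
    exact pvKey a b c x y z r t
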